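-- pv_equiv track=rewrite | github.com/daniel-reich/ubiquitous-fiesta | 6DppMcokmzJ3TtNNB_22.py | true_alphabetic
-- ===== SOURCE A (Python) =====
-- def true_alphabetic(txt):
--   words = txt.split(' ')
--   str = ''.join(sorted(''.join(words)))
--   arr = []
--   i = 0
--   for w in words:
--     length = len(w)
--     arr.append(str[i:(i+length)])
--     i += length
--   return ' '.join(arr)
-- ===== SOURCE B (Python) =====
-- def true_alphabetic(txt):
--   letters = iter(sorted(c for c in txt if c != ' '))
--   return ''.join(c if c == ' ' else next(letters) for c in txt)
-- ===== Notes on version B (the rewrite author's own statement) =====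
-- stated objective: simpler
-- what changed: Instead of splitting into words and re-joining slices of the sorted letters at cumulative word-length offsets, B makes one per-character pass over the original string, keeping each space in place and drawing the next character from a single sorted-letters iterator.
import Mathlib
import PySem

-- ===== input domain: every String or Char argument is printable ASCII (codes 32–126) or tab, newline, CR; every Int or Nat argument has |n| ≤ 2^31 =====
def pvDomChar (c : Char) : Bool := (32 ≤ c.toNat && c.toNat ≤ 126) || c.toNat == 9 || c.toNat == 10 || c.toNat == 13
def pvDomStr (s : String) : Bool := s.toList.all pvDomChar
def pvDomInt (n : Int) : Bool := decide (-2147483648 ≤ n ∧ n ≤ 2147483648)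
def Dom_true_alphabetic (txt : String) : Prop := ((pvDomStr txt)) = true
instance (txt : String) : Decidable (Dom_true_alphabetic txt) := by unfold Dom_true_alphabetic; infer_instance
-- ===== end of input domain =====

-- B makes one per-character pass over txt, keeping spaces in place and drawing from a sorted-letters
-- stream, instead of A's word split plus cumulative-index slices of the sorted string (objective: simpler).

-- ===== PORT A =====
def true_alphabetic (txt : String) : String :=
  let words := PySem.Chars.splitOn txt.toList [' ']                       -- txt.split(' ')
  let str := PySem.List.sorted (PySem.Chars.join [] words) (fun c => c) false  -- ''.join(sorted(''.join(words)))
  let res := words.foldl                                                   -- for w in words: arr.append(str[i:i+len(w)]); i += len(w)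
      (fun (p : List (List Char) × Int) w =>
        (p.1 ++ [PySem.List.slice str (some p.2) (some (p.2 + (w.length : Int)))],
         p.2 + (w.length : Int)))
      ([], (0 : Int))
  String.ofList (PySem.Chars.join [' '] res.1)                             -- ' '.join(arr)

-- ===== PORT B =====
-- the per-character pass: emit the char itself on ' ', otherwise take next(letters)
def fillSorted : List Char → List Char → List Char
  | [], _ => []
  | c :: cs, rest =>
    if c = ' ' then c :: fillSorted cs rest
    else
      match rest with
      | [] => []                -- next() on an exhausted iterator: unreachable in B
      | r :: rs => r :: fillSorted cs rs

def true_alphabetic_alt (txt : String) : String :=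
  let letters := PySem.List.sorted (txt.toList.filter (fun c => c ≠ ' ')) (fun c => c) false
  String.ofList (fillSorted txt.toList letters)

-- ===== PRECONDITION & SPEC =====
def Spec_true_alphabetic (txt : String) (out : String) : Prop := out = true_alphabetic_alt txt
instance (txt : String) (out : String) : Decidable (Spec_true_alphabetic txt out) := by unfold Spec_true_alphabetic; infer_instance

-- ===== CLAIM (what is proved, stated in full; the proofs are below) =====
def Claim_equal_true_alphabetic : Prop := ∀ (txt : String), Dom_true_alphabetic txt → Spec_true_alphabetic txt (true_alphabetic txt)

-- ===== LEMMAS AND PROOFS =====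

-- the value of split(' ') as a structural recursion
def mySplit : List Char → List (List Char)
  | [] => [[]]
  | c :: t =>
    if c = ' ' then [] :: mySplit t
    else
      match mySplit t with
      | [] => [[c]]
      | w :: ws => (c :: w) :: ws

def consHead (p : List Char) : List (List Char) → List (List Char)
  | [] => [p]
  | w :: ws => (p ++ w) :: ws

theorem mySplit_ne_nil (l : List Char) : mySplit l ≠ [] := by
  cases l with
  | nil => simp [mySplit]
  | cons c t =>
    simp only [mySplit]
    split
    · simp
    · cases h : mySplit t <;> simp

theorem consHead_nil_of_ne (ms : List (List Char)) (h : ms ≠ []) : consHead [] ms = ms := by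
  cases ms with
  | nil => exact absurd rfl h
  | cons w ws => simp [consHead]

theorem consHead_consHead (p : List Char) (c : Char) (ms : List (List Char)) :
    consHead (p ++ [c]) ms = consHead p (consHead [c] ms) := by
  cases ms <;> simp [consHead]

theorem mySplit_cons_space (t : List Char) : mySplit (' ' :: t) = [] :: mySplit t := by
  simp [mySplit]

theorem mySplit_cons_of_ne (c : Char) (t : List Char) (h : ¬ c = ' ') :
    mySplit (c :: t) = consHead [c] (mySplit t) := by
  simp only [mySplit, if_neg h]
  cases hm : mySplit t <;> simp [consHead]

theorem go_spec : ∀ (fuel : ℕ) (l cur acc : _), l.length < fuel →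
    PySem.Chars.splitOn.go [' '] fuel l cur acc =
      acc.reverse ++ consHead cur.reverse (mySplit l) := by
  intro fuel
  induction fuel with
  | zero => intro l cur acc h; omega
  | succ f ih =>
    intro l cur acc h
    cases l with
    | nil =>
      simp [PySem.Chars.splitOn.go, mySplit, consHead]
    | cons c rest =>
      by_cases hc : c = ' '
      · subst hc
        rw [show PySem.Chars.splitOn.go [' '] (f+1) (' ' :: rest) cur acc
              = PySem.Chars.splitOn.go [' '] f rest [] (cur.reverse :: acc) by
            simp [PySem.Chars.splitOn.go, List.isPrefixOf]]
        rw [ih rest [] (cur.reverse :: acc) (by simpa using h)]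
        simp only [List.reverse_nil, List.reverse_cons]
        rw [consHead_nil_of_ne _ (mySplit_ne_nil rest), mySplit_cons_space]
        cases hm : mySplit rest with
        | nil => exact absurd hm (mySplit_ne_nil rest)
        | cons w ws => simp [consHead]
      · rw [show PySem.Chars.splitOn.go [' '] (f+1) (c :: rest) cur acc
              = PySem.Chars.splitOn.go [' '] f rest (c :: cur) acc by
            simp [PySem.Chars.splitOn.go, List.isPrefixOf]
            intro h'; exact absurd h'.symm hc]
        rw [ih rest (c :: cur) acc (by simpa using h)]
        rw [mySplit_cons_of_ne c rest hc]
        simp [consHead_consHead]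

theorem splitOn_eq_mySplit (l : List Char) :
    PySem.Chars.splitOn l [' '] = mySplit l := by
  show PySem.Chars.splitOn.go [' '] (l.length + 1) l [] [] = _
  rw [go_spec (l.length + 1) l [] [] (by omega)]
  simpa using consHead_nil_of_ne _ (mySplit_ne_nil l)

theorem join_cons_first (sep : List Char) (c : Char) (w : List Char) (ws : List (List Char)) :
    PySem.Chars.join sep ((c :: w) :: ws) = c :: PySem.Chars.join sep (w :: ws) := by
  cases ws with
  | nil => simp [PySem.Chars.join_singleton]
  | cons m ms => simp [PySem.Chars.join_cons_cons]

theorem join_mySplit (l : List Char) : PySem.Chars.join [' '] (mySplit l) = l := by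
  induction l with
  | nil => simp [mySplit, PySem.Chars.join_singleton]
  | cons c t ih =>
    by_cases hc : c = ' '
    · subst hc
      rw [mySplit_cons_space]
      cases hm : mySplit t with
      | nil => exact absurd hm (mySplit_ne_nil t)
      | cons m ms =>
        rw [PySem.Chars.join_cons_cons]
        rw [hm] at ih
        simp [ih]
    · rw [mySplit_cons_of_ne c t hc]
      cases hm : mySplit t with
      | nil => exact absurd hm (mySplit_ne_nil t)
      | cons m ms =>
        rw [hm] at ih
        simpa [consHead, join_cons_first] using ih

theorem mySplit_no_space (l : List Char) : ∀ w ∈ mySplit l, ' ' ∉ w := by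
  induction l with
  | nil => simp [mySplit]
  | cons c t ih =>
    by_cases hc : c = ' '
    · subst hc
      rw [mySplit_cons_space]
      intro w hw
      rcases List.mem_cons.mp hw with h | h
      · simp [h]
      · exact ih w h
    · rw [mySplit_cons_of_ne c t hc]
      cases hm : mySplit t with
      | nil =>
        exact absurd hm (mySplit_ne_nil t)
      | cons m ms =>
        intro w hw
        rw [hm] at ih
        simp only [consHead] at hw
        rcases List.mem_cons.mp hw with h | h
        · subst h
          intro hmem
          rcases List.mem_append.mp hmem with h' | h'
          · simp only [List.mem_singleton] at h'
            exact hc h'.symm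
          · exact ih m (by simp) h'
        · exact ih w (by simp [h])

theorem join_nil_cons (w : List Char) (t : List (List Char)) :
    PySem.Chars.join [] (w :: t) = w ++ PySem.Chars.join [] t := by
  cases t with
  | nil => simp [PySem.Chars.join_singleton, PySem.Chars.join_nil]
  | cons m ms => simp [PySem.Chars.join_cons_cons]

theorem join_nil_mySplit (l : List Char) :
    PySem.Chars.join [] (mySplit l) = l.filter (fun c => c ≠ ' ') := by
  induction l with
  | nil => simp [mySplit, PySem.Chars.join_singleton]
  | cons c t ih =>
    by_cases hc : c = ' '
    · subst hc
      rw [mySplit_cons_space, join_nil_cons, ih]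
      simp
    · rw [mySplit_cons_of_ne c t hc]
      cases hm : mySplit t with
      | nil => exact absurd hm (mySplit_ne_nil t)
      | cons m ms =>
        rw [hm] at ih
        simp only [consHead]
        rw [join_nil_cons] at ih ⊢
        simp [hc, ih]

-- A's loop as structural recursion on the word list
def chop : List (List Char) → List Char → List (List Char)
  | [], _ => []
  | w :: ws, s => s.take w.length :: chop ws (s.drop w.length)

theorem foldl_chop (s : List Char) : ∀ (ws : List (List Char)) (acc : List (List Char)) (k : ℕ),
    (ws.foldl
      (fun (p : List (List Char) × Int) w =>
        (p.1 ++ [PySem.List.slice s (some p.2) (some (p.2 + (w.length : Int)))],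
         p.2 + (w.length : Int)))
      (acc, (k : Int))).1 = acc ++ chop ws (s.drop k) := by
  intro ws
  induction ws with
  | nil => intro acc k; simp [chop]
  | cons w t ih =>
    intro acc k
    simp only [List.foldl_cons]
    rw [show ((k : Int) + (w.length : Int)) = ((k + w.length : ℕ) : Int) by push_cast; ring]
    rw [ih (acc ++ [PySem.List.slice s (some (k : Int)) (some ((k + w.length : ℕ) : Int))]) (k + w.length)]
    rw [show ((k + w.length : ℕ) : Int) = (k : Int) + (w.length : Int) by push_cast; ring]
    rw [PySem.List.slice_natCast_add]
    simp [chop, List.drop_drop]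

theorem fill_word : ∀ (w : List Char) (r s : List Char), ' ' ∉ w → w.length ≤ s.length →
    fillSorted (w ++ r) s = s.take w.length ++ fillSorted r (s.drop w.length) := by
  intro w
  induction w with
  | nil => intro r s _ _; simp
  | cons c w' ih =>
    intro r s hsp hlen
    cases s with
    | nil => simp at hlen
    | cons d s' =>
      have hc : ¬ c = ' ' := fun h => hsp (by simp [h])
      simp only [List.cons_append, fillSorted, if_neg hc]
      rw [ih r s' (fun h => hsp (by simp [h])) (by simpa using hlen)]
      simp

theorem fill_join : ∀ (ws : List (List Char)) (s : List Char),
    (∀ w ∈ ws, ' ' ∉ w) → (PySem.Chars.join [] ws).length ≤ s.length →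
    fillSorted (PySem.Chars.join [' '] ws) s = PySem.Chars.join [' '] (chop ws s) := by
  intro ws
  induction ws with
  | nil => intro s _ _; simp [PySem.Chars.join_nil, fillSorted, chop]
  | cons w t ih =>
    intro s hsp hlen
    have hwlen : w.length ≤ s.length := by
      rw [join_nil_cons] at hlen
      simp at hlen; omega
    cases t with
    | nil =>
      rw [PySem.Chars.join_singleton]
      have := fill_word w [] s (hsp w (by simp)) hwlen
      simp only [List.append_nil] at this
      rw [this]
      simp [chop, fillSorted, PySem.Chars.join_singleton]
    | cons m ms =>
      rw [PySem.Chars.join_cons_cons]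
      rw [show w ++ [' '] ++ PySem.Chars.join [' '] (m :: ms)
            = w ++ (' ' :: PySem.Chars.join [' '] (m :: ms)) by simp]
      rw [fill_word w _ s (hsp w (by simp)) hwlen]
      simp only [fillSorted, if_pos]
      rw [ih (s.drop w.length) (fun x hx => hsp x (by simp [hx]))
          (by rw [join_nil_cons] at hlen; simp at hlen ⊢; omega)]
      have hch : chop (m :: ms) (s.drop w.length)
          = (s.drop w.length).take m.length :: chop ms ((s.drop w.length).drop m.length) := rfl
      rw [show chop (w :: m :: ms) s = s.take w.length :: chop (m :: ms) (s.drop w.length) from rfl]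
      rw [hch, PySem.Chars.join_cons_cons, ← hch]
      simp

-- ===== VERDICT (by name: the statement is the Claim_ definition above) =====
theorem true_alphabetic_spec : Claim_equal_true_alphabetic := by
  unfold Claim_equal_true_alphabetic
  intro txt _
  show true_alphabetic txt = true_alphabetic_alt txt
  have hA : true_alphabetic txt = String.ofList (PySem.Chars.join [' ']
      ((List.foldl (fun (p : List (List Char) × Int) w =>
          (p.1 ++ [PySem.List.slice
              (PySem.List.sorted (PySem.Chars.join [] (PySem.Chars.splitOn txt.toList [' '])) (fun c => c) false)
              (some p.2) (some (p.2 + (w.length : Int)))],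
           p.2 + (w.length : Int)))
        ([], (0 : Int)) (PySem.Chars.splitOn txt.toList [' '])).1)) := rfl
  have hB : true_alphabetic_alt txt = String.ofList (fillSorted txt.toList
      (PySem.List.sorted (txt.toList.filter (fun c => c ≠ ' ')) (fun c => c) false)) := rfl
  rw [hA, hB, splitOn_eq_mySplit]
  set cs := txt.toList with hcs
  set ws := mySplit cs with hws
  rw [show cs.filter (fun c => c ≠ ' ') = PySem.Chars.join [] ws from (join_nil_mySplit cs).symm]
  set str := PySem.List.sorted (PySem.Chars.join [] ws) (fun c => c) false with hstr
  have hlen : (PySem.Chars.join [] ws).length ≤ str.length := by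
    rw [hstr, PySem.List.length_sorted]
  have hfold := foldl_chop str ws [] 0
  simp only [Nat.cast_zero, List.drop_zero, List.nil_append] at hfold
  rw [hfold]
  conv_rhs => rw [show cs = PySem.Chars.join [' '] ws from (join_mySplit cs).symm]
  rw [fill_join ws str (mySplit_no_space cs) hlen]
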